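-- pv_equiv track=rewrite | github.com/SarthakMaggu/style-agent | src/fashion_knowledge/color_theory.py | is_clash
-- ===== SOURCE A (Python) =====
-- _CLASH_PAIRS: list[frozenset[str]] = [
--     frozenset({"rust", "cool grey"}),
--     frozenset({"terracotta", "cobalt blue"}),
--     frozenset({"mustard", "lavender"}),
--     frozenset({"orange", "pink"}),
--     frozenset({"red", "green"}),  # unless deliberate Christmas-style contrast
--     frozenset({"yellow", "purple"}),
--     frozenset({"icy white", "warm beige"}),
--     frozenset({"neon yellow", "neon pink"}),
--     frozenset({"royal purple", "warm orange"}),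
-- ]
--
-- _MONO_FAMILIES: list[set[str]] = [
--     {"navy", "cobalt", "icy blue", "denim blue", "deep blue"},
--     {"rust", "terracotta", "burnt orange", "warm orange", "coral"},
--     {"burgundy", "deep burgundy", "wine", "maroon"},
--     {"emerald", "forest green", "olive green", "sage"},
--     {"charcoal", "cool grey", "slate", "silver"},
--     {"camel", "warm beige", "warm tan", "sand"},
--     {"ivory", "cream", "warm cream", "off-white"},
-- ]
--
-- def is_clash(color_a: str, color_b: str) -> bool:
--     """Return True if the two colors are a known clashing pair.
--
--     Monochromatic pairings within the same color family are never flagged as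
--     clashes even if their raw strings differ.
--
--     Args:
--         color_a: First color (lowercase, descriptive string).
--         color_b: Second color (lowercase, descriptive string).
--
--     Returns:
--         True if this is a clashing combination.
--     """
--     a, b = color_a.lower().strip(), color_b.lower().strip()
--     if a == b:
--         return False
--
--     # Monochromatic — same family never clashes
--     for family in _MONO_FAMILIES:
--         if a in family and b in family:
--             return False
--
--     return frozenset({a, b}) in {p for p in _CLASH_PAIRS}
-- ===== SOURCE B (Python) =====
-- _FAMILIES = (
--     ("navy", "cobalt", "icy blue", "denim blue", "deep blue"),
--     ("rust", "terracotta", "burnt orange", "warm orange", "coral"),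
--     ("burgundy", "deep burgundy", "wine", "maroon"),
--     ("emerald", "forest green", "olive green", "sage"),
--     ("charcoal", "cool grey", "slate", "silver"),
--     ("camel", "warm beige", "warm tan", "sand"),
--     ("ivory", "cream", "warm cream", "off-white"),
-- )
--
-- # inverted index: color -> family id (families are pairwise disjoint, so unambiguous)
-- _FAMILY_OF = {c: i for i, fam in enumerate(_FAMILIES) for c in fam}
--
-- # clash pairs as ordered tuples (one orientation each)
-- _CLASH = frozenset({
--     ("rust", "cool grey"),
--     ("terracotta", "cobalt blue"),
--     ("mustard", "lavender"),
--     ("orange", "pink"),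
--     ("red", "green"),
--     ("yellow", "purple"),
--     ("icy white", "warm beige"),
--     ("neon yellow", "neon pink"),
--     ("royal purple", "warm orange"),
-- })
--
--
-- def is_clash(color_a: str, color_b: str) -> bool:
--     """Return True if the two colors are a known clashing pair."""
--     a, b = color_a.lower().strip(), color_b.lower().strip()
--     if a == b:
--         return False
--     fa = _FAMILY_OF.get(a)
--     if fa is not None and fa == _FAMILY_OF.get(b):
--         return False
--     return (a, b) in _CLASH or (b, a) in _CLASH
-- ===== Notes on version B (the rewrite author's own statement) =====
-- stated objective: idiomatic
-- what changed: B replaces the per-call loop over _MONO_FAMILIES by a module-level inverted index mapping each color to its family id (one dict lookup per argument), and replaces the frozenset-of-frozensets membership test by a precomputed set of ordered tuples checked in both orders.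
import Mathlib
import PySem

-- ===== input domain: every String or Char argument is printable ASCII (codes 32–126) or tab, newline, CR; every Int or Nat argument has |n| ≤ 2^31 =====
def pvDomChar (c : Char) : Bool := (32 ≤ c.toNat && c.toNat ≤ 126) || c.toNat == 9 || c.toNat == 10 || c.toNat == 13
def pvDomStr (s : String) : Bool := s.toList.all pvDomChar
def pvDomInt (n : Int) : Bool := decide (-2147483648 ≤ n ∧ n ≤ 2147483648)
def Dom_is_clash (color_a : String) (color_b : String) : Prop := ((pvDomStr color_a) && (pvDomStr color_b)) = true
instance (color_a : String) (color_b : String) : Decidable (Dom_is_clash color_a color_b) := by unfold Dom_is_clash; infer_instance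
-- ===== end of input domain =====

-- B replaces the loop over _MONO_FAMILIES by a precomputed color -> family-id index and the
-- frozenset-of-frozensets test by an ordered-tuple set checked in both orders (objective: idiomatic).


-- ===== PORT A =====
def pvClashPairsA : List (PySem.Set String) :=
  [PySem.Set.ofList ["rust", "cool grey"],
   PySem.Set.ofList ["terracotta", "cobalt blue"],
   PySem.Set.ofList ["mustard", "lavender"],
   PySem.Set.ofList ["orange", "pink"],
   PySem.Set.ofList ["red", "green"],
   PySem.Set.ofList ["yellow", "purple"],
   PySem.Set.ofList ["icy white", "warm beige"],
   PySem.Set.ofList ["neon yellow", "neon pink"],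
   PySem.Set.ofList ["royal purple", "warm orange"]]

def pvMonoFamiliesA : List (PySem.Set String) :=
  [PySem.Set.ofList ["navy", "cobalt", "icy blue", "denim blue", "deep blue"],
   PySem.Set.ofList ["rust", "terracotta", "burnt orange", "warm orange", "coral"],
   PySem.Set.ofList ["burgundy", "deep burgundy", "wine", "maroon"],
   PySem.Set.ofList ["emerald", "forest green", "olive green", "sage"],
   PySem.Set.ofList ["charcoal", "cool grey", "slate", "silver"],
   PySem.Set.ofList ["camel", "warm beige", "warm tan", "sand"],
   PySem.Set.ofList ["ivory", "cream", "warm cream", "off-white"]]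

-- 'frozenset({a, b}) in {p for p in _CLASH_PAIRS}': membership in a set of frozensets compares
-- candidates by frozenset (i.e. finite-set) equality; exact hand-port via PySem.Set.equal over
-- the comprehension's underlying list (building the outer set cannot change membership).
def pvClashReturn (a b : String) : Bool :=
  pvClashPairsA.any (fun p => PySem.Set.equal (PySem.Set.ofList [a, b]) p)

-- the 'for family in _MONO_FAMILIES' loop with its early 'return False';
-- falling off the loop reaches the final return statement.
def pvMonoLoop (a b : String) : List (PySem.Set String) → Bool
  | [] => pvClashReturn a b
  | f :: rest =>
      if PySem.Set.contains f a && PySem.Set.contains f b then false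
      else pvMonoLoop a b rest

def is_clash (color_a : String) (color_b : String) : Bool :=
  let a := PySem.Str.strip (PySem.Str.lower color_a)
  let b := PySem.Str.strip (PySem.Str.lower color_b)
  if a == b then false
  else pvMonoLoop a b pvMonoFamiliesA

-- ===== PORT B =====
def pvFamilies : List (List String) :=
  [["navy", "cobalt", "icy blue", "denim blue", "deep blue"],
   ["rust", "terracotta", "burnt orange", "warm orange", "coral"],
   ["burgundy", "deep burgundy", "wine", "maroon"],
   ["emerald", "forest green", "olive green", "sage"],
   ["charcoal", "cool grey", "slate", "silver"],
   ["camel", "warm beige", "warm tan", "sand"],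
   ["ivory", "cream", "warm cream", "off-white"]]

-- _FAMILY_OF = {c: i for i, fam in enumerate(_FAMILIES) for c in fam}
def pvFamilyOf : PySem.Dict String Int :=
  (PySem.List.enumerate pvFamilies).foldl
    (fun d p => p.2.foldl (fun d c => d.insert c p.1) d) PySem.Dict.empty

def pvClashTuples : PySem.Set (String × String) :=
  PySem.Set.ofList
    [("rust", "cool grey"),
     ("terracotta", "cobalt blue"),
     ("mustard", "lavender"),
     ("orange", "pink"),
     ("red", "green"),
     ("yellow", "purple"),
     ("icy white", "warm beige"),
     ("neon yellow", "neon pink"),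
     ("royal purple", "warm orange")]

def is_clash_alt (color_a : String) (color_b : String) : Bool :=
  let a := PySem.Str.strip (PySem.Str.lower color_a)
  let b := PySem.Str.strip (PySem.Str.lower color_b)
  if a == b then false
  else
    let fa := pvFamilyOf.get? a
    if fa.isSome && fa == pvFamilyOf.get? b then false
    else PySem.Set.contains pvClashTuples (a, b) || PySem.Set.contains pvClashTuples (b, a)

-- ===== PRECONDITION & SPEC =====
def Spec_is_clash (color_a : String) (color_b : String) (out : Bool) : Prop := out = is_clash_alt color_a color_b
instance (color_a : String) (color_b : String) (out : Bool) : Decidable (Spec_is_clash color_a color_b out) := by unfold Spec_is_clash; infer_instance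

-- ===== CLAIM (what is proved, stated in full; the proofs are below) =====
def Claim_equal_is_clash : Prop := ∀ (color_a : String) (color_b : String), Dom_is_clash color_a color_b → Spec_is_clash color_a color_b (is_clash color_a color_b)

-- ===== LEMMAS AND PROOFS =====

-- every color string mentioned by either program
def pvAllColors : List String :=
  ["navy", "cobalt", "icy blue", "denim blue", "deep blue",
   "rust", "terracotta", "burnt orange", "warm orange", "coral",
   "burgundy", "deep burgundy", "wine", "maroon",
   "emerald", "forest green", "olive green", "sage",
   "charcoal", "cool grey", "slate", "silver",
   "camel", "warm beige", "warm tan", "sand",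
   "ivory", "cream", "warm cream", "off-white",
   "cobalt blue", "mustard", "lavender", "orange", "pink",
   "red", "green", "yellow", "purple",
   "icy white", "neon yellow", "neon pink", "royal purple"]

-- the two function bodies after normalisation
def pvBodyA (a b : String) : Bool :=
  if a == b then false else pvMonoLoop a b pvMonoFamiliesA

def pvBodyB (a b : String) : Bool :=
  if a == b then false
  else
    let fa := pvFamilyOf.get? a
    if fa.isSome && fa == pvFamilyOf.get? b then false
    else PySem.Set.contains pvClashTuples (a, b) || PySem.Set.contains pvClashTuples (b, a)

lemma is_clash_eq (ca cb : String) :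
    is_clash ca cb = pvBodyA (PySem.Str.strip (PySem.Str.lower ca)) (PySem.Str.strip (PySem.Str.lower cb)) := rfl

lemma is_clash_alt_eq (ca cb : String) :
    is_clash_alt ca cb = pvBodyB (PySem.Str.strip (PySem.Str.lower ca)) (PySem.Str.strip (PySem.Str.lower cb)) := rfl

-- exhaustive agreement on the finitely many colors the tables mention
lemma pvTable :
    (pvAllColors.all fun x => pvAllColors.all fun y => pvBodyA x y == pvBodyB x y) = true := by decide

lemma pvMonoLoop_skip (x y : String) (fams : List (PySem.Set String))
    (h : ∀ f ∈ fams, (PySem.Set.contains f x && PySem.Set.contains f y) = false) :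
    pvMonoLoop x y fams = pvClashReturn x y := by
  induction fams with
  | nil => rfl
  | cons f rest ih =>
      simp only [pvMonoLoop, h f (by simp)]
      exact ih (fun g hg => h g (by simp [hg]))

lemma pvFams_sub : ∀ f ∈ pvMonoFamiliesA, ∀ c ∈ f, c ∈ pvAllColors := by decide

lemma pvPairs_sub : ∀ p ∈ pvClashPairsA, ∀ c ∈ p, c ∈ pvAllColors := by decide

lemma pvKeys_sub : ∀ k ∈ pvFamilyOf.keys, k ∈ pvAllColors := by decide

lemma pvTuples_sub : ∀ t ∈ pvClashTuples, t.1 ∈ pvAllColors ∧ t.2 ∈ pvAllColors := by decide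

lemma pvClashReturn_false (x y : String) (h : x ∉ pvAllColors ∨ y ∉ pvAllColors) :
    pvClashReturn x y = false := by
  simp only [pvClashReturn, List.any_eq_false]
  intro p hp
  simp only [Bool.not_eq_true]
  cases heq : PySem.Set.equal (PySem.Set.ofList [x, y]) p
  · rfl
  · exfalso
    have hmem := (PySem.Set.equal_iff _ _).mp heq
    rcases h with h | h
    · exact h (pvPairs_sub p hp x ((hmem x).mp (by simp [PySem.Set.mem_ofList])))
    · exact h (pvPairs_sub p hp y ((hmem y).mp (by simp [PySem.Set.mem_ofList])))

lemma pvBodyA_out (x y : String) (h : x ∉ pvAllColors ∨ y ∉ pvAllColors) :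
    pvBodyA x y = false := by
  unfold pvBodyA
  split
  · rfl
  · rw [pvMonoLoop_skip x y _ ?_, pvClashReturn_false x y h]
    intro f hf
    rcases h with h | h
    · cases hc : PySem.Set.contains f x
      · simp
      · exact absurd (pvFams_sub f hf x ((PySem.Set.contains_iff f x).mp hc)) h
    · cases hc : PySem.Set.contains f y
      · simp
      · exact absurd (pvFams_sub f hf y ((PySem.Set.contains_iff f y).mp hc)) h

lemma pvTupleMiss (x y : String) (h : x ∉ pvAllColors ∨ y ∉ pvAllColors) :
    PySem.Set.contains pvClashTuples (x, y) = false := by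
  cases hc : PySem.Set.contains pvClashTuples (x, y)
  · rfl
  · exfalso
    have hm := (PySem.Set.contains_iff _ _).mp hc
    rcases h with h | h
    · exact h (pvTuples_sub _ hm).1
    · exact h (pvTuples_sub _ hm).2

lemma pvGetNone (x : String) (h : x ∉ pvAllColors) : pvFamilyOf.get? x = none := by
  cases hg : pvFamilyOf.get? x with
  | none => rfl
  | some i =>
      exfalso
      have hc : pvFamilyOf.contains x = true := by
        cases hcc : pvFamilyOf.contains x
        · rw [← PySem.Dict.get?_eq_none_iff_contains] at hcc
          rw [hcc] at hg; cases hg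
        · rfl
      exact h (pvKeys_sub x ((PySem.Dict.contains_iff_mem_keys _ _).mp hc))

lemma pvBodyB_out (x y : String) (h : x ∉ pvAllColors ∨ y ∉ pvAllColors) :
    pvBodyB x y = false := by
  unfold pvBodyB
  split
  · rfl
  · have hxy : (x, y) ∉ pvClashTuples := by
      intro hm
      have hf := pvTupleMiss x y h
      rw [(PySem.Set.contains_iff _ _).mpr hm] at hf; cases hf
    have hyx : (y, x) ∉ pvClashTuples := by
      intro hm
      have hf := pvTupleMiss y x h.symm
      rw [(PySem.Set.contains_iff _ _).mpr hm] at hf; cases hf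
    rcases h with h | h
    · rw [pvGetNone x h]
      simp [hxy, hyx]
    · rw [pvGetNone y h]
      cases pvFamilyOf.get? x <;> simp [hxy, hyx]

lemma pvBodies_eq (x y : String) : pvBodyA x y = pvBodyB x y := by
  by_cases hx : x ∈ pvAllColors
  · by_cases hy : y ∈ pvAllColors
    · have h1 := (List.all_eq_true.mp pvTable) x hx
      have h2 := (List.all_eq_true.mp h1) y hy
      exact eq_of_beq h2
    · rw [pvBodyA_out x y (Or.inr hy), pvBodyB_out x y (Or.inr hy)]
  · rw [pvBodyA_out x y (Or.inl hx), pvBodyB_out x y (Or.inl hx)]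

-- ===== VERDICT (by name: the statement is the Claim_ definition above) =====
theorem is_clash_spec : Claim_equal_is_clash := by
  intro ca cb _
  unfold Spec_is_clash
  rw [is_clash_eq, is_clash_alt_eq]
  exact pvBodies_eq _ _
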